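-- pv_equiv track=rewrite | github.com/jeonghun98/algorithm | 1128/18.py | check
-- ===== SOURCE A (Python) =====
-- def check(p) :
--     count = 0
--     for i in p:
--         if i == "(":
--             count += 1
--         else:
--             count -= 1
--             if count < 0 :
--                 return False
--     return True
-- ===== SOURCE B (Python) =====
-- def check(p):
--     # Pair-cancellation algorithm: normalize every non-'(' char to ')',
--     # repeatedly erase matched "()" pairs; the count never went negative
--     # iff no unmatched ')' survives the reduction.
--     t = "".join("(" if c == "(" else ")" for c in p)
--     while "()" in t:
--         t = t.replace("()", "")
--     return ")" not in t
-- ===== Notes on version B (the rewrite author's own statement) =====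
-- stated objective: alternative
-- what changed: B replaces the online +1/-1 counter loop with a Dyck-style pair-cancellation rewriting: normalize each char to '(' or ')', repeatedly delete "()" substrings, and return whether no ')' remains.
import Mathlib
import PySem

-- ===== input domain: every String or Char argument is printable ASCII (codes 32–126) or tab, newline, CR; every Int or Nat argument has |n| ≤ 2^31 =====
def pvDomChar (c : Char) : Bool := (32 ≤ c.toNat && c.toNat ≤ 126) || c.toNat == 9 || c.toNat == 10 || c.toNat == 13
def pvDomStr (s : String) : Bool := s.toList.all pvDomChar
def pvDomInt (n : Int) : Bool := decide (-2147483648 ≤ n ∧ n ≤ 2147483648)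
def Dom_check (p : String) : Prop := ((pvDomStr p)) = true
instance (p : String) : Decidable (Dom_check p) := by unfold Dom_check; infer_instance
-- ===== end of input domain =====

-- B replaces A's online counter loop by Dyck-style "()"-pair cancellation (alternative algorithm, not faster).

-- ===== PORT A =====
-- the for-loop over p with counter `count`, early return False when count < 0
def checkGo : List Char → Int → Bool
  | [], _ => true
  | c :: rest, count =>
      if c = '(' then checkGo rest (count + 1)
      else if count - 1 < 0 then false
      else checkGo rest (count - 1)

def check (p : String) : Bool := checkGo p.toList 0

-- ===== PORT B =====
-- '"(" if c == "(" else ")"'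
def normCh (c : Char) : Char := if c = '(' then '(' else ')'

-- t.replace("()", ""): delete all non-overlapping "()" occurrences, left to right
def repl : List Char → List Char
  | [] => []
  | [c] => [c]
  | a :: b :: rest => if a = '(' ∧ b = ')' then repl rest else a :: repl (b :: rest)

-- '"()" in t'
def hasPair : List Char → Bool
  | [] => false
  | [_] => false
  | a :: b :: rest => (a = '(' && b = ')') || hasPair (b :: rest)

theorem repl_length_le (t : List Char) : (repl t).length ≤ t.length := by
  induction t using repl.induct with
  | case1 => simp [repl]
  | case2 => simp [repl]
  | case3 a b rest h ih => simp only [repl, if_pos h]; simp at ih ⊢; omega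
  | case4 a b rest h ih => simp only [repl, if_neg h]; simp at ih ⊢; omega

theorem repl_length_lt (t : List Char) (h : hasPair t = true) :
    (repl t).length < t.length := by
  induction t using repl.induct with
  | case1 => simp [hasPair] at h
  | case2 => simp [hasPair] at h
  | case3 a b rest hp ih =>
      have := repl_length_le rest
      simp only [repl, if_pos hp]; simp; omega
  | case4 a b rest hp ih =>
      simp only [hasPair] at h
      rcases Bool.or_eq_true_iff.mp h with h1 | h1
      · exact absurd ⟨by simpa using (Bool.and_eq_true_iff.mp h1).1,
          by simpa using (Bool.and_eq_true_iff.mp h1).2⟩ hp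
      · simp only [repl, if_neg hp]
        have := ih h1
        simp only [List.length_cons] at this ⊢
        omega

-- 'while "()" in t: t = t.replace("()", "")'
def reduce (t : List Char) : List Char :=
  if h : hasPair t = true then reduce (repl t) else t
termination_by t.length
decreasing_by exact repl_length_lt _ h

def check_alt (p : String) : Bool :=
  !((reduce (p.toList.map normCh)).contains ')')

-- ===== PRECONDITION & SPEC =====
def Spec_check (p : String) (out : Bool) : Prop := out = check_alt p
instance (p : String) (out : Bool) : Decidable (Spec_check p out) := by unfold Spec_check; infer_instance

-- ===== CLAIM (what is proved, stated in full; the proofs are below) =====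
def Claim_equal_check : Prop := ∀ (p : String), Dom_check p → Spec_check p (check p)

-- ===== LEMMAS AND PROOFS =====

-- erasing one layer of "()" pairs does not change A's verdict (for nonnegative counter)
theorem checkGo_repl (t : List Char) : ∀ c : Int, 0 ≤ c →
    checkGo (repl t) c = checkGo t c := by
  induction t using repl.induct with
  | case1 => intro c _; rfl
  | case2 => intro c _; rfl
  | case3 a b rest hp ih =>
      intro c hc
      obtain ⟨ha, hb⟩ := hp; subst ha; subst hb
      rw [show repl ('(' :: ')' :: rest) = repl rest from by simp [repl]]
      rw [ih c hc]
      simp only [checkGo, if_pos rfl, if_neg (by decide : ¬ (')' : Char) = '(')]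
      rw [if_neg (by omega : ¬ (c + 1 - 1 < 0))]
      congr 1
      ring
  | case4 a b rest hp ih =>
      intro c hc
      simp only [repl, if_neg hp]
      by_cases hao : a = '('
      · simp only [checkGo, if_pos hao]
        exact ih (c + 1) (by omega)
      · simp only [checkGo, if_neg hao]
        by_cases hneg : c - 1 < 0
        · simp only [if_pos hneg]
        · simp only [if_neg hneg]
          exact ih (c - 1) (by omega)

theorem checkGo_reduce (t : List Char) : ∀ c : Int, 0 ≤ c →
    checkGo (reduce t) c = checkGo t c := by
  induction t using reduce.induct with
  | case1 t h ih =>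
      intro c hc
      rw [reduce, dif_pos h, ih c hc, checkGo_repl t c hc]
  | case2 t h =>
      intro c hc
      rw [reduce, dif_neg h]

theorem hasPair_reduce (t : List Char) : hasPair (reduce t) = false := by
  induction t using reduce.induct with
  | case1 t h ih => rw [reduce, dif_pos h]; exact ih
  | case2 t h => rw [reduce, dif_neg h]; simpa using h

-- repl only keeps characters of its input
theorem mem_repl (t : List Char) (x : Char) (hx : x ∈ repl t) : x ∈ t := by
  induction t using repl.induct with
  | case1 => simpa [repl] using hx
  | case2 => simpa [repl] using hx
  | case3 a b rest hp ih =>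
      simp only [repl, if_pos hp] at hx
      simp [ih hx]
  | case4 a b rest hp ih =>
      simp only [repl, if_neg hp] at hx
      rcases List.mem_cons.mp hx with h | h
      · simp [h]
      · have := ih h
        simp only [List.mem_cons] at this ⊢
        tauto

theorem all_repl (P : Char → Bool) (t : List Char) (h : t.all P = true) :
    (repl t).all P = true := by
  rw [List.all_eq_true] at h ⊢
  exact fun x hx => h x (mem_repl t x hx)

theorem all_reduce (P : Char → Bool) (t : List Char) (h : t.all P = true) :
    (reduce t).all P = true := by
  induction t using reduce.induct with
  | case1 t hp ih => rw [reduce, dif_pos hp]; exact ih (all_repl P t h)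
  | case2 t hp => rw [reduce, dif_neg hp]; exact h

def isBin (c : Char) : Bool := c = '(' || c = ')'

-- a pair-free binary string starting with '(' is all '('
theorem allOpen (t : List Char) : t.all isBin = true → hasPair ('(' :: t) = false →
    t.all (fun c => c = '(') = true := by
  induction t with
  | nil => intro _ _; rfl
  | cons c rest ih =>
      intro hb hp
      simp only [List.all_cons, Bool.and_eq_true] at hb
      simp only [hasPair] at hp
      rcases Bool.or_eq_false_iff.mp hp with ⟨h1, h2⟩
      have hcne : c ≠ ')' := by
        intro hcc; subst hcc; simp at h1
      have hc : c = '(' := by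
        have := hb.1
        simp only [isBin, Bool.or_eq_true, decide_eq_true_eq] at this
        tauto
      subst hc
      simp only [List.all_cons, Bool.and_eq_true]
      exact ⟨by simp, ih hb.2 h2⟩

theorem checkGo_allOpen (t : List Char) : ∀ c : Int,
    t.all (fun c => c = '(') = true → checkGo t c = true := by
  induction t with
  | nil => intro c _; rfl
  | cons x rest ih =>
      intro c h
      simp only [List.all_cons, Bool.and_eq_true, decide_eq_true_eq] at h
      simp only [checkGo, if_pos h.1]
      exact ih (c + 1) h.2

-- on pair-free binary strings, A's verdict is "no ')' present"
theorem noPair_check (t : List Char) (hb : t.all isBin = true)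
    (hnp : hasPair t = false) : checkGo t 0 = !(t.contains ')') := by
  cases t with
  | nil => rfl
  | cons c rest =>
      simp only [List.all_cons, Bool.and_eq_true] at hb
      by_cases hc : c = '('
      · subst hc
        have hopen := allOpen rest hb.2 hnp
        have h1 : checkGo ('(' :: rest) 0 = true := by
          simp only [checkGo, if_pos rfl]
          exact checkGo_allOpen rest 1 hopen
        have hmem : ')' ∉ rest := by
          intro hm
          have := List.all_eq_true.mp hopen ')' hm
          simp at this
        have h2 : (('(' :: rest).contains ')') = false := by
          simp
          exact hmem
        rw [h1, h2]; rfl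
      · have hc' : c = ')' := by
          have := hb.1
          simp only [isBin, Bool.or_eq_true, decide_eq_true_eq] at this
          tauto
        subst hc'
        have h1 : checkGo (')' :: rest) 0 = false := by
          simp [checkGo]
        rw [h1]
        simp

theorem checkGo_norm (l : List Char) : ∀ c : Int,
    checkGo (l.map normCh) c = checkGo l c := by
  induction l with
  | nil => intro c; rfl
  | cons x rest ih =>
      intro c
      by_cases hx : x = '('
      · subst hx
        simp [checkGo, normCh, ih (c + 1)]
      · have hn : normCh x = ')' := by simp [normCh, hx]
        simp only [List.map_cons, checkGo, hn,
          if_neg (by decide : ¬ (')' : Char) = '('), if_neg hx]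
        split
        · rfl
        · exact ih (c - 1)

theorem norm_isBin (l : List Char) : (l.map normCh).all isBin = true := by
  induction l with
  | nil => rfl
  | cons x rest ih =>
      simp only [List.map_cons, List.all_cons, Bool.and_eq_true]
      refine ⟨?_, ih⟩
      by_cases hx : x = '(' <;> simp [normCh, isBin, hx]

-- ===== VERDICT (by name: the statement is the Claim_ definition above) =====
theorem check_spec : Claim_equal_check := by
  intro p _
  unfold Spec_check check check_alt
  set t := p.toList.map normCh with ht
  have hb : t.all isBin = true := norm_isBin p.toList
  have hbr : (reduce t).all isBin = true := all_reduce isBin t hb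
  calc checkGo p.toList 0
      = checkGo t 0 := (checkGo_norm p.toList 0).symm
    _ = checkGo (reduce t) 0 := (checkGo_reduce t 0 le_rfl).symm
    _ = !((reduce t).contains ')') := noPair_check (reduce t) hbr (hasPair_reduce t)
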